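-- pv_equiv track=rewrite | github.com/justanotherfivemdev/vibe5d-blender | engine/query.py | _split_select_fields
-- ===== SOURCE A (Python) =====
-- from typing import Dict, Any, List, Tuple
--
-- def _split_select_fields(select_clause: str) -> List[str]:
--     """Split SELECT fields respecting parentheses and quoted strings."""
--     fields = []
--     current_field = ""
--     paren_depth = 0
--     in_quotes = False
--     quote_char = None
--
--     i = 0
--     while i < len(select_clause):
--         char = select_clause[i]
--
--         if char in ('"', "'") and not in_quotes:
--             in_quotes = True
--             quote_char = char
--             current_field += char
--         elif char == quote_char and in_quotes:
--
--             if i + 1 < len(select_clause) and select_clause[i + 1] == quote_char: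
--                 current_field += char * 2
--                 i += 1
--             else:
--                 in_quotes = False
--                 quote_char = None
--                 current_field += char
--         elif not in_quotes:
--             if char == '(':
--                 paren_depth += 1
--                 current_field += char
--             elif char == ')':
--                 paren_depth -= 1
--                 current_field += char
--             elif char == ',' and paren_depth == 0:
--                 fields.append(current_field.strip())
--                 current_field = ""
--             else:
--                 current_field += char
--         else:
--             current_field += char
--
--         i += 1
--
--     if current_field.strip():
--         fields.append(current_field.strip())
--
--     if paren_depth != 0:
--         raise ValueError("Mismatched parentheses in SELECT clause")
--
--     if in_quotes:
--         raise ValueError(f"Unclosed quote in SELECT clause")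
--
--     return fields
-- ===== SOURCE B (Python) =====
-- from typing import List
--
-- def _find_break(s: str):
--     """Scan s for the first comma at paren depth 0 outside quotes.
--     Returns (index_or_None, paren_depth, in_quotes) at the stopping point."""
--     paren_depth = 0
--     in_quotes = False
--     quote_char = None
--     i = 0
--     n = len(s)
--     while i < n:
--         c = s[i]
--         if in_quotes:
--             if c == quote_char:
--                 if i + 1 < n and s[i + 1] == quote_char:
--                     i += 1
--                 else:
--                     in_quotes = False
--                     quote_char = None
--         else:
--             if c in ('"', "'"):
--                 in_quotes = True
--                 quote_char = c
--             elif c == '(':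
--                 paren_depth += 1
--             elif c == ')':
--                 paren_depth -= 1
--             elif c == ',' and paren_depth == 0:
--                 return i, paren_depth, in_quotes
--         i += 1
--     return None, paren_depth, in_quotes
--
-- def _split_select_fields(select_clause: str) -> List[str]:
--     """Split SELECT fields respecting parentheses and quoted strings."""
--     fields = []
--     rest = select_clause
--     while True:
--         idx, paren_depth, in_quotes = _find_break(rest)
--         if idx is None:
--             break
--         fields.append(rest[:idx].strip())
--         rest = rest[idx + 1:]
--     if paren_depth != 0:
--         raise ValueError("Mismatched parentheses in SELECT clause")
--     if in_quotes:
--         raise ValueError("Unclosed quote in SELECT clause")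
--     last = rest.strip()
--     if last:
--         fields.append(last)
--     return fields
-- ===== Notes on version B (the rewrite author's own statement) =====
-- stated objective: faster
-- what changed: B replaces A's single char-by-char loop that grows a current-field string one character at a time with a two-pass split-by-segments decomposition: a scanner that only locates the next top-level comma (index plus scanner flags) and an outer loop that slices whole segments out of the string, stripping/error-checking afterwards.
import Mathlib
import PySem

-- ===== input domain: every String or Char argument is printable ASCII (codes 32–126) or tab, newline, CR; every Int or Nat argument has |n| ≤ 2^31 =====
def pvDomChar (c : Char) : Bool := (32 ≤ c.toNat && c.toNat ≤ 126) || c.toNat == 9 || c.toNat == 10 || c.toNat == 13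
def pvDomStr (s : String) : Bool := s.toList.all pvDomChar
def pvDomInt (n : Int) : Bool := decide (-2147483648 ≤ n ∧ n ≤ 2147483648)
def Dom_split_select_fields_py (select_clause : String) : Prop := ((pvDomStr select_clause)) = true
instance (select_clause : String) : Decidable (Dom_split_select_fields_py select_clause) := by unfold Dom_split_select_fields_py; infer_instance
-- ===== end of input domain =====

-- ===== PORT A =====
-- B replaces A's char-by-char loop that grows a current-field string with a scanner that
-- only locates each top-level comma plus whole-segment slicing (measurably faster in the
-- timing run); return values proved equal.
-- A raises ValueError on unbalanced parentheses / unclosed quotes: those inputs are outside Pre_.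

-- literal port of A's while loop; state = (fields, current_field, paren_depth, in_quotes),
-- quote_char threaded as an argument (a local variable A never returns)
def aLoop : List Char → List String → List Char → Int → Bool → Option Char →
    (List String × List Char × Int × Bool)
  | [], fields, cur, d, q, _ => (fields, cur, d, q)
  | c :: rest, fields, cur, d, q, qc =>
    if (c = '"' ∨ c = '\'') ∧ q = false then
      aLoop rest fields (cur ++ [c]) d true (some c)
    else if some c = qc ∧ q = true then
      match rest with
      | c2 :: rest2 =>
        if some c2 = qc then aLoop rest2 fields (cur ++ [c, c]) d q qc
        else aLoop (c2 :: rest2) fields (cur ++ [c]) d false none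
      | [] => (fields, cur ++ [c], d, false)
    else if q = false then
      if c = '(' then aLoop rest fields (cur ++ [c]) (d + 1) q qc
      else if c = ')' then aLoop rest fields (cur ++ [c]) (d - 1) q qc
      else if c = ',' ∧ d = 0 then aLoop rest (fields ++ [String.ofList (PySem.Chars.strip cur)]) [] d q qc
      else aLoop rest fields (cur ++ [c]) d q qc
    else aLoop rest fields (cur ++ [c]) d q qc

def split_select_fields_py (select_clause : String) : List String :=
  let r := aLoop select_clause.toList [] [] 0 false none
  r.1 ++ (if PySem.Chars.strip r.2.1 ≠ [] then [String.ofList (PySem.Chars.strip r.2.1)] else [])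

-- ===== PORT B =====
-- literal port of Source B's _find_break: first top-level comma outside quotes;
-- returns (its index | none, paren_depth, in_quotes) at the stopping point
def findBreak : List Char → Nat → Int → Bool → Option Char → (Option Nat × Int × Bool)
  | [], _, d, q, _ => (none, d, q)
  | c :: rest, i, d, q, qc =>
    if q = true then
      if some c = qc then
        match rest with
        | c2 :: rest2 =>
          if some c2 = qc then findBreak rest2 (i + 2) d q qc
          else findBreak (c2 :: rest2) (i + 1) d false none
        | [] => (none, d, false)
      else findBreak rest (i + 1) d q qc
    else
      if c = '"' ∨ c = '\'' then findBreak rest (i + 1) d true (some c)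
      else if c = '(' then findBreak rest (i + 1) (d + 1) q qc
      else if c = ')' then findBreak rest (i + 1) (d - 1) q qc
      else if c = ',' ∧ d = 0 then (some i, d, q)
      else findBreak rest (i + 1) d q qc

-- port of Source B's outer `while True` loop: slice off one field per top-level comma;
-- returns (fields, remaining last segment, final paren_depth, final in_quotes)
def bLoop (rest : List Char) (fields : List String) : List String × List Char × Int × Bool :=
  match h : findBreak rest 0 0 false none with
  | (some j, _, _) =>
    bLoop (rest.drop (j + 1)) (fields ++ [String.ofList (PySem.Chars.strip (rest.take j))])
  | (none, d, q) => (fields, rest, d, q)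
termination_by rest.length
decreasing_by
  cases rest with
  | nil => simp [findBreak] at h
  | cons a t => simp [List.length_drop]

def split_select_fields_py_alt (select_clause : String) : List String :=
  let r := bLoop select_clause.toList []
  r.1 ++ (if PySem.Chars.strip r.2.1 ≠ [] then [String.ofList (PySem.Chars.strip r.2.1)] else [])

-- ===== PRECONDITION & SPEC =====
-- per-character balance checker (state = (paren_depth, in_quotes, quote_char)); a doubled
-- quote is read as close-then-reopen, which ends in the same state as A's two-char skip
def pvBalStep (st : Int × Bool × Option Char) (c : Char) : Int × Bool × Option Char :=
  if st.2.1 = true then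
    if some c = st.2.2 then (st.1, false, none) else st
  else if c = '"' ∨ c = '\'' then (st.1, true, some c)
  else if c = '(' then (st.1 + 1, st.2)
  else if c = ')' then (st.1 - 1, st.2)
  else st

-- exactly the inputs where A returns (no ValueError): balanced parentheses and closed quotes
def Pre_split_select_fields_py (select_clause : String) : Prop :=
  (select_clause.toList.foldl pvBalStep (0, false, none)).1 = 0 ∧
  (select_clause.toList.foldl pvBalStep (0, false, none)).2.1 = false
instance (select_clause : String) : Decidable (Pre_split_select_fields_py select_clause) := by
  unfold Pre_split_select_fields_py; infer_instance

def pvWitness_split_select_fields_py : String := "a, f(b, 'x,''y'), c"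

def Spec_split_select_fields_py (select_clause : String) (out : List String) : Prop := out = split_select_fields_py_alt select_clause
instance (select_clause : String) (out : List String) : Decidable (Spec_split_select_fields_py select_clause out) := by unfold Spec_split_select_fields_py; infer_instance

-- ===== CLAIM (what is proved, stated in full; the proofs are below) =====
def Claim_equal_split_select_fields_py : Prop := ∀ (select_clause : String), Dom_split_select_fields_py select_clause → Pre_split_select_fields_py select_clause → Spec_split_select_fields_py select_clause (split_select_fields_py select_clause)

-- ===== LEMMAS AND PROOFS =====

-- unfolding equations for the two scanners (they are defined by well-founded recursion)
lemma aLoop_nil (fields : List String) (cur : List Char) (d : Int) (q : Bool) (qc : Option Char) :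
    aLoop [] fields cur d q qc = (fields, cur, d, q) := by
  conv_lhs => rw [aLoop.eq_def]

lemma aLoop_cons (c : Char) (rest : List Char) (fields : List String) (cur : List Char)
    (d : Int) (q : Bool) (qc : Option Char) :
    aLoop (c :: rest) fields cur d q qc =
      (if (c = '"' ∨ c = '\'') ∧ q = false then
        aLoop rest fields (cur ++ [c]) d true (some c)
      else if some c = qc ∧ q = true then
        match rest with
        | c2 :: rest2 =>
          if some c2 = qc then aLoop rest2 fields (cur ++ [c, c]) d q qc
          else aLoop (c2 :: rest2) fields (cur ++ [c]) d false none
        | [] => (fields, cur ++ [c], d, false)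
      else if q = false then
        if c = '(' then aLoop rest fields (cur ++ [c]) (d + 1) q qc
        else if c = ')' then aLoop rest fields (cur ++ [c]) (d - 1) q qc
        else if c = ',' ∧ d = 0 then aLoop rest (fields ++ [String.ofList (PySem.Chars.strip cur)]) [] d q qc
        else aLoop rest fields (cur ++ [c]) d q qc
      else aLoop rest fields (cur ++ [c]) d q qc) := by
  conv_lhs => rw [aLoop.eq_def]

lemma findBreak_nil (i : Nat) (d : Int) (q : Bool) (qc : Option Char) :
    findBreak [] i d q qc = (none, d, q) := by
  conv_lhs => rw [findBreak.eq_def]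

lemma findBreak_cons (c : Char) (rest : List Char) (i : Nat) (d : Int) (q : Bool) (qc : Option Char) :
    findBreak (c :: rest) i d q qc =
      (if q = true then
        if some c = qc then
          match rest with
          | c2 :: rest2 =>
            if some c2 = qc then findBreak rest2 (i + 2) d q qc
            else findBreak (c2 :: rest2) (i + 1) d false none
          | [] => (none, d, false)
        else findBreak rest (i + 1) d q qc
      else
        if c = '"' ∨ c = '\'' then findBreak rest (i + 1) d true (some c)
        else if c = '(' then findBreak rest (i + 1) (d + 1) q qc
        else if c = ')' then findBreak rest (i + 1) (d - 1) q qc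
        else if c = ',' ∧ d = 0 then (some i, d, q)
        else findBreak rest (i + 1) d q qc) := by
  conv_lhs => rw [findBreak.eq_def]

-- when not in quotes, aLoop ignores the carried quote_char
lemma aLoop_qc_irrel : ∀ (cs : List Char) fields cur d qc qc',
    aLoop cs fields cur d false qc = aLoop cs fields cur d false qc' := by
  intro cs
  induction cs with
  | nil => intro _ _ _ _ _; rw [aLoop_nil, aLoop_nil]
  | cons c rest ih =>
    intro fields cur d qc qc'
    rw [aLoop_cons, aLoop_cons]
    by_cases h1 : (c = '"' ∨ c = '\'')
    · simp [h1]
    · simp only [h1, false_and, Bool.false_eq_true, and_false, if_false]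
      split_ifs <;> first | rfl | apply ih

-- findBreak's start index only shifts the returned comma index
lemma findBreak_shift_n (n : Nat) : ∀ (cs : List Char), cs.length ≤ n → ∀ i d q qc,
    findBreak cs i d q qc =
      ((findBreak cs 0 d q qc).1.map (· + i), (findBreak cs 0 d q qc).2) := by
  induction n with
  | zero =>
    intro cs hlen i d q qc
    have : cs = [] := List.eq_nil_of_length_eq_zero (Nat.le_zero.mp hlen)
    subst this; simp [findBreak_nil]
  | succ n ih =>
    intro cs hlen i d q qc
    cases cs with
    | nil => simp [findBreak_nil]
    | cons c rest =>
      have hr : rest.length ≤ n := by simp at hlen; omega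
      rw [findBreak_cons, findBreak_cons]
      by_cases hq : q = true
      · subst hq
        simp only [if_pos rfl]
        by_cases hc : some c = qc
        · simp only [if_pos hc]
          cases rest with
          | nil => simp
          | cons c2 rest2 =>
            have hr2 : rest2.length ≤ n := by simp at hlen; omega
            by_cases hc2 : some c2 = qc
            · simp only [if_pos hc2]
              rw [ih rest2 hr2 (i + 2), ih rest2 hr2 2]
              cases h2 : (findBreak rest2 0 d true qc).1 <;>
                simp [h2, Option.map] <;> omega
            · simp only [if_neg hc2]
              rw [ih _ hr (i + 1), ih _ hr 1]
              cases h2 : (findBreak (c2 :: rest2) 0 d false none).1 <;>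
                simp [h2, Option.map] <;> omega
        · simp only [if_neg hc]
          rw [ih rest hr (i + 1), ih rest hr 1]
          cases h2 : (findBreak rest 0 d true qc).1 <;>
            simp [h2, Option.map] <;> omega
      · simp only [hq, if_neg (by simp [hq] : ¬ q = true)]
        have shift1 : ∀ d' q' (qc' : Option Char),
            findBreak rest (i + 1) d' q' qc' =
              (((findBreak rest 1 d' q' qc').1.map (· + i)), (findBreak rest 1 d' q' qc').2) := by
          intro d' q' qc'
          rw [ih rest hr (i + 1), ih rest hr 1]
          cases h2 : (findBreak rest 0 d' q' qc').1 <;>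
            simp [h2, Option.map] <;> omega
        split_ifs <;> first | exact (False.elim (by assumption)) | simp [shift1]

-- what aLoop computes, phrased through findBreak: the target of the main induction
def lspec (cs : List Char) (fields : List String) (cur : List Char) (d : Int) (q : Bool)
    (qc : Option Char) : List String × List Char × Int × Bool :=
  match findBreak cs 0 d q qc with
  | (some j, _, _) =>
    aLoop (cs.drop (j + 1)) (fields ++ [String.ofList (PySem.Chars.strip (cur ++ cs.take j))]) [] 0 false none
  | (none, d', q') => (fields, cur ++ cs, d', q')

-- one ordinary character consumed by both scanners with the same state transition
lemma lspec_step_one (n : Nat)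
    (ih : ∀ (cs : List Char), cs.length ≤ n → ∀ fields cur d q qc,
        aLoop cs fields cur d q qc = lspec cs fields cur d q qc)
    (c : Char) (rest : List Char) (hlen : rest.length ≤ n)
    (fields : List String) (cur : List Char) (d : Int) (q : Bool) (qc : Option Char)
    (d' : Int) (q' : Bool) (qc' : Option Char)
    (hfb : findBreak (c :: rest) 0 d q qc = findBreak rest 1 d' q' qc')
    (hal : aLoop (c :: rest) fields cur d q qc = aLoop rest fields (cur ++ [c]) d' q' qc') :
    aLoop (c :: rest) fields cur d q qc = lspec (c :: rest) fields cur d q qc := by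
  rw [hal, ih rest hlen]
  unfold lspec
  rw [hfb, findBreak_shift_n n rest hlen 1 d' q' qc']
  cases h2 : findBreak rest 0 d' q' qc' with
  | mk o snd =>
    cases o with
    | none => simp
    | some j =>
      simp only [Option.map_some]
      have h1 : (c :: rest).drop (j + 1 + 1) = rest.drop (j + 1) := by simp
      have h3 : cur ++ (c :: rest).take (j + 1) = (cur ++ [c]) ++ rest.take j := by
        simp
      rw [h1, h3]

-- a doubled quote: two characters consumed by both scanners, state unchanged
lemma lspec_step_two (n : Nat)
    (ih : ∀ (cs : List Char), cs.length ≤ n → ∀ fields cur d q qc,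
        aLoop cs fields cur d q qc = lspec cs fields cur d q qc)
    (c c2 : Char) (rest2 : List Char) (hlen : rest2.length ≤ n) (hcc : c2 = c)
    (fields : List String) (cur : List Char) (d : Int) (q : Bool) (qc : Option Char)
    (hfb : findBreak (c :: c2 :: rest2) 0 d q qc = findBreak rest2 2 d q qc)
    (hal : aLoop (c :: c2 :: rest2) fields cur d q qc = aLoop rest2 fields (cur ++ [c, c]) d q qc) :
    aLoop (c :: c2 :: rest2) fields cur d q qc = lspec (c :: c2 :: rest2) fields cur d q qc := by
  subst hcc
  rw [hal, ih rest2 hlen]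
  unfold lspec
  rw [hfb, findBreak_shift_n n rest2 hlen 2 d q qc]
  cases h2 : findBreak rest2 0 d q qc with
  | mk o snd =>
    cases o with
    | none => simp
    | some j =>
      simp only [Option.map_some]
      have h1 : (c2 :: c2 :: rest2).drop (j + 2 + 1) = rest2.drop (j + 1) := by simp
      have h3 : cur ++ (c2 :: c2 :: rest2).take (j + 2) = (cur ++ [c2, c2]) ++ rest2.take j := by
        simp
      rw [h1, h3]

-- MAIN LEMMA: aLoop's whole run, described by the first top-level comma findBreak locates
lemma aLoop_eq_lspec (n : Nat) : ∀ (cs : List Char), cs.length ≤ n →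
    ∀ fields cur d q qc, aLoop cs fields cur d q qc = lspec cs fields cur d q qc := by
  induction n with
  | zero =>
    intro cs hlen fields cur d q qc
    have : cs = [] := List.eq_nil_of_length_eq_zero (Nat.le_zero.mp hlen)
    subst this; simp [aLoop_nil, lspec, findBreak_nil]
  | succ n ih =>
    intro cs hlen fields cur d q qc
    cases cs with
    | nil => simp [aLoop_nil, lspec, findBreak_nil]
    | cons c rest =>
      have hr : rest.length ≤ n := by simp at hlen; omega
      by_cases hq : q = true
      · -- in quotes
        by_cases hc : some c = qc
        · cases rest with
          | nil =>
            -- closing quote at the very end: both scanners stop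
            rw [aLoop_cons]
            simp only [hq, and_false, if_neg (by simp : ¬((c = '"' ∨ c = '\'') ∧ true = false)),
              hc, and_self, if_pos (And.intro hc rfl)]
            simp [lspec, findBreak_cons, hq, hc]
          | cons c2 rest2 =>
            by_cases hc2 : some c2 = qc
            · -- doubled quote
              have hcc : c2 = c := by
                rw [← hc] at hc2; exact (Option.some_inj.mp hc2)
              refine lspec_step_two n ih c c2 rest2 (by simp at hlen; omega) hcc fields cur d q qc ?_ ?_
              · rw [findBreak_cons]; simp [hq, hc, hc2]
              · rw [aLoop_cons]; simp [hq, hc, hc2]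
            · -- closing quote
              refine lspec_step_one n ih c (c2 :: rest2) hr fields cur d q qc d false none ?_ ?_
              · rw [findBreak_cons]; simp [hq, hc, hc2]
              · rw [aLoop_cons]; simp [hq, hc, hc2]
        · -- ordinary character inside quotes
          refine lspec_step_one n ih c rest hr fields cur d q qc d q qc ?_ ?_
          · rw [findBreak_cons]; simp [hq, hc]
          · rw [aLoop_cons]; simp [hq, hc]
      · -- not in quotes
        have hqf : q = false := by cases q <;> simp_all
        subst hqf
        by_cases h1 : c = '"' ∨ c = '\''
        · -- opening quote
          refine lspec_step_one n ih c rest hr fields cur d false qc d true (some c) ?_ ?_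
          · rw [findBreak_cons]; simp [h1]
          · rw [aLoop_cons]; simp [h1]
        · by_cases h2 : c = '('
          · refine lspec_step_one n ih c rest hr fields cur d false qc (d + 1) false qc ?_ ?_
            · rw [findBreak_cons]; simp [h1, h2]
            · rw [aLoop_cons]; simp [h1, h2]
          · by_cases h3 : c = ')'
            · refine lspec_step_one n ih c rest hr fields cur d false qc (d - 1) false qc ?_ ?_
              · rw [findBreak_cons]; simp [h1, h2, h3]
              · rw [aLoop_cons]; simp [h1, h2, h3]
            · by_cases h4 : c = ',' ∧ d = 0
              · -- top-level comma: findBreak stops here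
                obtain ⟨hc', hd⟩ := h4
                subst hc'; subst hd
                have hf : findBreak (',' :: rest) 0 0 false qc = (some 0, 0, false) := by
                  rw [findBreak_cons]; simp [h1]
                rw [aLoop_cons]
                unfold lspec
                rw [hf]
                simp [h1]
                exact aLoop_qc_irrel rest (fields ++ [String.ofList (PySem.Chars.strip cur)]) [] 0 qc none
              · refine lspec_step_one n ih c rest hr fields cur d false qc d false qc ?_ ?_
                · rw [findBreak_cons]; simp [h1, h2, h3, h4]
                · rw [aLoop_cons]; simp [h1, h2, h3, h4]

-- A's loop equals B's outer slicing loop (their result tuples coincide)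
lemma aLoop_eq_bLoop (n : Nat) : ∀ (cs : List Char), cs.length ≤ n →
    ∀ fields, aLoop cs fields [] 0 false none = bLoop cs fields := by
  induction n with
  | zero =>
    intro cs hlen fields
    have : cs = [] := List.eq_nil_of_length_eq_zero (Nat.le_zero.mp hlen)
    subst this
    rw [aLoop_nil, bLoop]
    split <;> simp_all [findBreak_nil]
  | succ n ih =>
    intro cs hlen fields
    rw [aLoop_eq_lspec (n + 1) cs hlen, lspec, bLoop]
    cases h : findBreak cs 0 0 false none with
    | mk o snd =>
      cases o with
      | none => simp
      | some j =>
        simp only [List.nil_append]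
        have hne : cs ≠ [] := by
          intro he; subst he; rw [findBreak_nil] at h; simp at h
        have hlt : (cs.drop (j + 1)).length ≤ n := by
          have : 0 < cs.length := List.length_pos_iff.mpr hne
          simp [List.length_drop]; omega
        exact ih _ hlt _

-- ===== VERDICT (by name: the statement is the Claim_ definition above) =====
theorem split_select_fields_py_spec : Claim_equal_split_select_fields_py := by
  intro s _ _
  unfold Spec_split_select_fields_py split_select_fields_py split_select_fields_py_alt
  rw [aLoop_eq_bLoop s.toList.length s.toList (le_refl _) []]
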